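-- pv_equiv track=rewrite | github.com/swjungle4a-algorithm/algorithm_study | 윤찬/lv.3/숫자게임.py | solution
-- ===== SOURCE A (Python) =====
-- def solution(A, B):
--     answer = 0
--     A = sorted(A)
--     B = sorted(B)
--     for a in A:
--         idx = 0
--         for b in B:
--             if a < b:
--                 answer += 1
--                 del B[idx]
--                 break
--             idx += 1
--     return answer
-- ===== SOURCE B (Python) =====
-- def solution(A, B):
--     A = sorted(A)
--     B = sorted(B)
--     answer = 0
--     i = j = 0
--     while i < len(A) and j < len(B):
--         if A[i] < B[j]:
--             answer += 1
--             i += 1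
--         j += 1
--     return answer
-- ===== Notes on version B (the rewrite author's own statement) =====
-- stated objective: faster
-- what changed: Replaced the nested scan-and-delete over a mutated B with a merge-style two-pointer pass that walks both sorted lists simultaneously, so after sorting the matching is one O(n) sweep with no inner scan and no list deletions.
import Mathlib
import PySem

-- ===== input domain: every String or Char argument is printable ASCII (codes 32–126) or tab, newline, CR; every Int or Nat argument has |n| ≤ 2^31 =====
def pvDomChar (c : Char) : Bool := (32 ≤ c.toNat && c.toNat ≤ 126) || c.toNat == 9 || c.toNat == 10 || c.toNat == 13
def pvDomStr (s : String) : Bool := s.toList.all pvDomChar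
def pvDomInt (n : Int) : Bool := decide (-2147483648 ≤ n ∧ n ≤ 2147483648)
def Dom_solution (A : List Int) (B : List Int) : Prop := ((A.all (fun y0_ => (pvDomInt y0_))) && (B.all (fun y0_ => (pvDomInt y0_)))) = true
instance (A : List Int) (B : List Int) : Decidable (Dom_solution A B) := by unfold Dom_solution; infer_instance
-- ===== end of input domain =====

-- B replaces A's nested scan-and-delete of B with one merge-style two-pointer sweep
-- over both sorted lists: faster (asymptotic).

-- ===== PORT A =====
-- inner loop of A: scan B from the front; at the first b with a < b, delete it and
-- report success (some B'); if no such b, report none (no break taken).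
def pvInnerA (a : Int) : List Int → Option (List Int)
  | [] => none
  | b :: bs => if a < b then some bs else (pvInnerA a bs).map (b :: ·)

-- outer loop of A over the sorted A, threading the (mutated) B and the answer
def pvLoopA : List Int → List Int → Int → Int
  | [], _, ans => ans
  | a :: as, Bs, ans =>
    match pvInnerA a Bs with
    | some Bs' => pvLoopA as Bs' (ans + 1)
    | none => pvLoopA as Bs ans

def solution (A : List Int) (B : List Int) : Int :=
  pvLoopA (PySem.List.sorted A (fun x => x) false) (PySem.List.sorted B (fun x => x) false) 0

-- ===== PORT B =====
-- Source B's while loop: the two index pointers become the two remaining tails; each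
-- step consumes the head of B, and of A too when A's head is the smaller one.
def pvTwoPtr : List Int → List Int → Int
  | [], _ => 0
  | _, [] => 0
  | a :: as, b :: bs => if a < b then 1 + pvTwoPtr as bs else pvTwoPtr (a :: as) bs

def solution_alt (A : List Int) (B : List Int) : Int :=
  pvTwoPtr (PySem.List.sorted A (fun x => x) false) (PySem.List.sorted B (fun x => x) false)

-- ===== PRECONDITION & SPEC =====
def Spec_solution (A : List Int) (B : List Int) (out : Int) : Prop := out = solution_alt A B
instance (A : List Int) (B : List Int) (out : Int) : Decidable (Spec_solution A B out) := by unfold Spec_solution; infer_instance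

-- ===== CLAIM (what is proved, stated in full; the proofs are below) =====
def Claim_equal_solution : Prop := ∀ (A : List Int) (B : List Int), Dom_solution A B → Spec_solution A B (solution A B)

-- ===== LEMMAS AND PROOFS =====

-- elements ≤ a at the front of B are skipped by A's inner scan
theorem pvInnerA_append (a : Int) (P R : List Int) (hP : ∀ x ∈ P, x ≤ a) :
    pvInnerA a (P ++ R) = (pvInnerA a R).map (P ++ ·) := by
  induction P with
  | nil => simp
  | cons c P ih =>
    have hc : ¬ a < c := not_lt.mpr (hP c (by simp))
    simp only [List.cons_append, pvInnerA, if_neg hc,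
      ih (fun x hx => hP x (by simp [hx]))]
    cases pvInnerA a R <;> simp

-- B's sweep skips a front segment of elements ≤ a without effect
theorem pvTwoPtr_skip (a : Int) (as : List Int) (L R : List Int)
    (hL : ∀ x ∈ L, x ≤ a) : pvTwoPtr (a :: as) (L ++ R) = pvTwoPtr (a :: as) R := by
  induction L with
  | nil => rfl
  | cons c L ih =>
    have hc : ¬ a < c := not_lt.mpr (hL c (by simp))
    simp only [List.cons_append, pvTwoPtr, if_neg hc]
    exact ih (fun x hx => hL x (by simp [hx]))

-- on a sorted R, A's delete-first-greater scan either finds no match (all of R ≤ a)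
-- or splits R = L ++ b :: bs with L ≤ a and removes b.
theorem pvKey (a : Int) (R : List Int) (h : List.Pairwise (· ≤ ·) R) :
    (pvInnerA a R = none ∧ ∀ x ∈ R, x ≤ a) ∨
    (∃ L b bs, R = L ++ b :: bs ∧ a < b ∧
      pvInnerA a R = some (L ++ bs) ∧ ∀ x ∈ L, x ≤ a) := by
  induction R with
  | nil => exact Or.inl ⟨rfl, by simp⟩
  | cons c rs ih =>
    by_cases hc : c ≤ a
    · have hca : ¬ a < c := not_lt.mpr hc
      rcases ih (List.pairwise_cons.mp h).2 with ⟨h2, h3⟩ | ⟨L, b, bs, hR, hab, h2, h3⟩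
      · refine Or.inl ⟨by simp [pvInnerA, hca, h2], ?_⟩
        intro x hx
        rcases List.mem_cons.mp hx with hx | hx
        · exact hx ▸ hc
        · exact h3 x hx
      · refine Or.inr ⟨c :: L, b, bs, by simp [hR], hab,
          by simp [pvInnerA, hca, h2], ?_⟩
        intro x hx
        rcases List.mem_cons.mp hx with hx | hx
        · exact hx ▸ hc
        · exact h3 x hx
    · have hac : a < c := lt_of_not_ge hc
      exact Or.inr ⟨[], c, rs, by simp, hac, by simp [pvInnerA, hac], by simp⟩

-- main invariant: a prefix P of elements ≤ every remaining a may be kept by A's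
-- loop state while B's sweep has already consumed it; the answers line up.
theorem pvMain (as : List Int) : ∀ (P R : List Int) (ans : Int),
    List.Pairwise (· ≤ ·) as → List.Pairwise (· ≤ ·) R →
    (∀ x ∈ P, ∀ a ∈ as, x ≤ a) →
    pvLoopA as (P ++ R) ans = ans + pvTwoPtr as R := by
  induction as with
  | nil => intro P R ans _ _ _; simp [pvLoopA, pvTwoPtr]
  | cons a as ih =>
    intro P R ans hA hR hP
    have hAh : ∀ b ∈ as, a ≤ b := (List.pairwise_cons.mp hA).1
    have hAt : List.Pairwise (· ≤ ·) as := (List.pairwise_cons.mp hA).2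
    have hPa : ∀ x ∈ P, x ≤ a := fun x hx => hP x hx a (List.mem_cons_self ..)
    have hinner := pvInnerA_append a P R hPa
    rcases pvKey a R hR with ⟨h2, h3⟩ | ⟨L, b, bs, hReq, hab, h2, h3⟩
    · have hRside : pvTwoPtr (a :: as) R = 0 := by
        have := pvTwoPtr_skip a as R [] h3
        simpa using this
      simp only [pvLoopA, hinner, h2, Option.map_none]
      have := ih (P ++ R) [] ans hAt (by simp)
        (fun x hx a' ha' => by
          rcases List.mem_append.mp hx with hx | hx
          · exact hP x hx a' (List.mem_cons_of_mem _ ha')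
          · exact le_trans (h3 x hx) (hAh a' ha'))
      simp only [List.append_nil] at this
      rw [this, hRside]
      cases as <;> simp [pvTwoPtr]
    · have hbs : List.Pairwise (· ≤ ·) bs := by
        have := hReq ▸ hR
        exact (List.pairwise_cons.mp (List.pairwise_append.mp this).2.1).2
      have hRside : pvTwoPtr (a :: as) R = 1 + pvTwoPtr as bs := by
        rw [hReq, pvTwoPtr_skip a as L (b :: bs) h3]
        simp [pvTwoPtr, hab]
      simp only [pvLoopA, hinner, h2, Option.map_some]
      have := ih (P ++ L) bs (ans + 1) hAt hbs
        (fun x hx a' ha' => by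
          rcases List.mem_append.mp hx with hx | hx
          · exact hP x hx a' (List.mem_cons_of_mem _ ha')
          · exact le_trans (h3 x hx) (hAh a' ha'))
      simp only [List.append_assoc] at this ⊢
      rw [this, hRside]
      omega

-- ===== VERDICT (by name: the statement is the Claim_ definition above) =====
theorem solution_spec : Claim_equal_solution := by
  intro A B _
  unfold Spec_solution solution solution_alt
  have hA := PySem.List.sorted_pairwise (xs := A) (key := fun x => x)
  have hB := PySem.List.sorted_pairwise (xs := B) (key := fun x => x)
  simpa using pvMain _ [] _ 0 hA hB (by simp)
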